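-- pv_equiv track=rewrite | github.com/girishshirsat/practice | practiceQ57.py | findZeroSumTripletsInWindow
-- ===== SOURCE A (Python) =====
-- def findZeroSumTripletsInWindow(readings, windowSize):
--     L=len(readings)
--     A=[]
--     if L<3:
--         return A
--     else:
--         for i in range(L):
--             for j in range(L):
--                 for k in range(L):
--                     if i < j and j < k:
--                         if readings[i]+readings[j]+readings[k]==0 and k-i+1<=windowSize:
--                             if readings[i:k+1] not in A:
--                                 A.append(readings[i:k+1])
--         return A
-- ===== SOURCE B (Python) =====
-- def findZeroSumTripletsInWindow(readings, windowSize):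
--     # Index every value's positions once, then for each (i, j) pair look up the
--     # needed third value directly instead of scanning all k.
--     L = len(readings)
--     result = []
--     if L < 3:
--         return result
--     positions = {}
--     for idx, v in enumerate(readings):
--         positions.setdefault(v, []).append(idx)
--     seen = set()
--     for i in range(L):
--         kmax = min(L - 1, i + windowSize - 1)
--         for j in range(i + 1, kmax):
--             need = -(readings[i] + readings[j])
--             for k in positions.get(need, ()):
--                 if j < k <= kmax:
--                     window = readings[i:k + 1]
--                     t = tuple(window)
--                     if t not in seen:
--                         seen.add(t)
--                         result.append(window)
--     return result
-- ===== Notes on version B (the rewrite author's own statement) =====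
-- stated objective: faster
-- what changed: Replaces A's cubic scan over all (i,j,k) index triples by a one-pass value->positions index consulted per (i,j) pair for the needed third value, with set-based deduplication instead of a linear 'not in' scan over the output list.
import Mathlib
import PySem

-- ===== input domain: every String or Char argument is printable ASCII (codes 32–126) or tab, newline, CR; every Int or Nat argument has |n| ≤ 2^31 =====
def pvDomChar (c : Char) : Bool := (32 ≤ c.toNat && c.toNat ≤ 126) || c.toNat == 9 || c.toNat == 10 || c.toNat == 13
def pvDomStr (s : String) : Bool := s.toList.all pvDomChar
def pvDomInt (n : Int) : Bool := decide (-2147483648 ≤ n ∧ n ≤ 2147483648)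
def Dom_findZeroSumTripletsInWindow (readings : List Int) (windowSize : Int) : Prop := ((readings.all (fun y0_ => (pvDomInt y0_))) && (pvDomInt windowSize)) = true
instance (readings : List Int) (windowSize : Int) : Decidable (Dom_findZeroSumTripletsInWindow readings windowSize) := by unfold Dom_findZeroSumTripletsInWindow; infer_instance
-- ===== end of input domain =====

-- B replaces A's cubic scan by a positions index: for each (i, j) pair it looks the
-- needed third value up in a dict of value -> indices, deduplicating via a set.

-- ===== PORT A =====
def findZeroSumTripletsInWindow (readings : List Int) (windowSize : Int) : List (List Int) :=
  let L : Int := (readings.length : Int)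
  if L < 3 then []
  else
    (PySem.List.pyRange 0 L 1).foldl (fun A i =>
      (PySem.List.pyRange 0 L 1).foldl (fun A j =>
        (PySem.List.pyRange 0 L 1).foldl (fun A k =>
          if i < j ∧ j < k then
            if PySem.List.pyGetD readings i 0 + PySem.List.pyGetD readings j 0 + PySem.List.pyGetD readings k 0 = 0 ∧ k - i + 1 ≤ windowSize then
              if PySem.List.slice readings (some i) (some (k + 1)) ∈ A then A
              else A ++ [PySem.List.slice readings (some i) (some (k + 1))]
            else A
          else A) A) A) []

-- ===== PORT B =====
def findZeroSumTripletsInWindow_alt (readings : List Int) (windowSize : Int) : List (List Int) :=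
  let L : Int := (readings.length : Int)
  if L < 3 then []
  else
    let positions : PySem.Dict Int (List Int) :=
      (PySem.List.enumerate readings 0).foldl
        (fun d p => d.modify p.2 [] (fun l => l ++ [p.1])) PySem.Dict.empty
    ((PySem.List.pyRange 0 L 1).foldl
      (fun (st : PySem.Set (List Int) × List (List Int)) i =>
        let kmax := min (L - 1) (i + windowSize - 1)
        (PySem.List.pyRange (i + 1) kmax 1).foldl (fun st j =>
          let need := -(PySem.List.pyGetD readings i 0 + PySem.List.pyGetD readings j 0)
          (positions.getD need []).foldl (fun st k =>
            if j < k ∧ k ≤ kmax then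
              let window := PySem.List.slice readings (some i) (some (k + 1))
              if PySem.Set.contains st.1 window then st
              else (PySem.Set.add st.1 window, st.2 ++ [window])
            else st) st) st)
      (PySem.Set.empty, ([] : List (List Int)))).2

-- ===== PRECONDITION & SPEC =====
def Spec_findZeroSumTripletsInWindow (readings : List Int) (windowSize : Int) (out : List (List Int)) : Prop := out = findZeroSumTripletsInWindow_alt readings windowSize
instance (readings : List Int) (windowSize : Int) (out : List (List Int)) : Decidable (Spec_findZeroSumTripletsInWindow readings windowSize out) := by unfold Spec_findZeroSumTripletsInWindow; infer_instance

-- ===== CLAIM (what is proved, stated in full; the proofs are below) =====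
def Claim_equal_findZeroSumTripletsInWindow : Prop := ∀ (readings : List Int) (windowSize : Int), Dom_findZeroSumTripletsInWindow readings windowSize → Spec_findZeroSumTripletsInWindow readings windowSize (findZeroSumTripletsInWindow readings windowSize)

-- ===== LEMMAS AND PROOFS =====

-- proof-only shorthands for the two programs' common ingredients
def pvR (rd : List Int) (i : Int) : Int := PySem.List.pyGetD rd i 0
def pvWin (rd : List Int) (i k : Int) : List Int := PySem.List.slice rd (some i) (some (k + 1))
def pvCondA (rd : List Int) (w i j k : Int) : Bool :=
  decide ((i < j ∧ j < k) ∧ (pvR rd i + pvR rd j + pvR rd k = 0 ∧ k - i + 1 ≤ w))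
def pvWs (rd : List Int) (w i j : Int) : List (List Int) :=
  ((PySem.List.pyRange 0 (rd.length : Int) 1).filter (pvCondA rd w i j)).map (pvWin rd i)
-- common normal form: fold Set.add over the ordered multiset of candidate windows
def pvNF (rd : List Int) (w : Int) : List (List Int) :=
  ((PySem.List.pyRange 0 (rd.length : Int) 1).flatMap (fun i =>
    (PySem.List.pyRange 0 (rd.length : Int) 1).flatMap (fun j => pvWs rd w i j))).foldl
    PySem.Set.add []
def pvKmax (rd : List Int) (w i : Int) : Int := min ((rd.length : Int) - 1) (i + w - 1)
def pvGB (rd : List Int) (w i : Int) : List (List Int) :=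
  (PySem.List.pyRange (i + 1) (pvKmax rd w i) 1).flatMap (fun j =>
    ((PySem.List.pyRange 0 (rd.length : Int) 1).filter
      (fun k => decide (j < k ∧ k ≤ pvKmax rd w i) && (pvR rd k == -(pvR rd i + pvR rd j)))).map (pvWin rd i))

lemma pv_foldl_diag {α β : Type} (F : α × α → β → α × α) (u : α → β → α)
    (h : ∀ s x, F (s, s) x = (u s x, u s x)) :
    ∀ (l : List β) (s : α), l.foldl F (s, s) = (l.foldl u s, l.foldl u s) := by
  intro l
  induction l with
  | nil => intro s; rfl
  | cons x t ih => intro s; simp only [List.foldl_cons, h s x, ih]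

lemma pv_foldl_flatMap {α β γ : Type} (l : List α) (g : α → List β) (f : γ → β → γ) (init : γ) :
    l.foldl (fun acc x => (g x).foldl f acc) init = (l.flatMap g).foldl f init := by
  induction l generalizing init with
  | nil => rfl
  | cons x t ih => simp only [List.foldl_cons, List.flatMap_cons, List.foldl_append, ih]

-- A's innermost loop is a Set.add fold over the filtered windows
lemma pv_stepA (rd : List Int) (w i j : Int) (A : List (List Int)) :
    (PySem.List.pyRange 0 (rd.length : Int) 1).foldl (fun A k =>
      if i < j ∧ j < k then
        if PySem.List.pyGetD rd i 0 + PySem.List.pyGetD rd j 0 + PySem.List.pyGetD rd k 0 = 0 ∧ k - i + 1 ≤ w then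
          if PySem.List.slice rd (some i) (some (k + 1)) ∈ A then A
          else A ++ [PySem.List.slice rd (some i) (some (k + 1))]
        else A
      else A) A = (pvWs rd w i j).foldl PySem.Set.add A := by
  have hbody : ∀ (A : List (List Int)) (k : Int),
      (if i < j ∧ j < k then
        if PySem.List.pyGetD rd i 0 + PySem.List.pyGetD rd j 0 + PySem.List.pyGetD rd k 0 = 0 ∧ k - i + 1 ≤ w then
          if PySem.List.slice rd (some i) (some (k + 1)) ∈ A then A
          else A ++ [PySem.List.slice rd (some i) (some (k + 1))]
        else A
      else A)
      = if (i < j ∧ j < k) ∧ (pvR rd i + pvR rd j + pvR rd k = 0 ∧ k - i + 1 ≤ w) then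
          PySem.Set.add A (pvWin rd i k) else A := by
    intro A k
    simp only [pvR, pvWin, PySem.Set.add, PySem.Set.contains, List.contains_iff_mem]
    split_ifs <;> first | rfl | tauto
  have h2 : (fun (A : List (List Int)) (k : Int) =>
      if i < j ∧ j < k then
        if PySem.List.pyGetD rd i 0 + PySem.List.pyGetD rd j 0 + PySem.List.pyGetD rd k 0 = 0 ∧ k - i + 1 ≤ w then
          if PySem.List.slice rd (some i) (some (k + 1)) ∈ A then A
          else A ++ [PySem.List.slice rd (some i) (some (k + 1))]
        else A
      else A)
      = (fun (A : List (List Int)) (k : Int) =>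
        if (i < j ∧ j < k) ∧ (pvR rd i + pvR rd j + pvR rd k = 0 ∧ k - i + 1 ≤ w) then
          PySem.Set.add A (pvWin rd i k) else A) := by
    funext A k; exact hbody A k
  rw [h2, PySem.List.foldl_ite_eq_foldl_filter]
  simp only [pvWs, List.foldl_map]
  rfl

-- the positions dict indexes each value's occurrence positions, in order
lemma pv_positions (rd : List Int) (v : Int) :
    ((PySem.List.enumerate rd 0).foldl (fun d p => d.modify p.2 [] (fun l => l ++ [p.1]))
      PySem.Dict.empty).getD v []
    = (PySem.List.pyRange 0 (rd.length : Int) 1).filter (fun k => pvR rd k == v) := by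
  have h1 : (PySem.List.enumerate rd 0).foldl (fun d p => d.modify p.2 [] (fun l => l ++ [p.1]))
      (PySem.Dict.empty : PySem.Dict Int (List Int))
      = ((PySem.List.enumerate rd 0).map (fun p => (p.2, p.1))).foldl
          (fun d q => d.modify q.1 [] (fun l => l ++ [q.2])) PySem.Dict.empty := by
    rw [List.foldl_map]
  rw [h1, PySem.Dict.getD_foldl_modify_append, PySem.Dict.getD_empty]
  rw [PySem.List.enumerate_eq_map_pyRange rd 0]
  simp only [List.map_map, List.filter_map, pvR, PySem.List.len]
  simp [Function.comp_def]

-- B's innermost loop is a Set.add fold over its filtered windows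
lemma pv_stepB (rd : List Int) (w i j : Int) (s : List (List Int)) :
    ((PySem.List.pyRange 0 (rd.length : Int) 1).filter
      (fun k => pvR rd k == -(PySem.List.pyGetD rd i 0 + PySem.List.pyGetD rd j 0))).foldl
      (fun s k => if j < k ∧ k ≤ pvKmax rd w i then
        PySem.Set.add s (PySem.List.slice rd (some i) (some (k + 1))) else s) s
    = (((PySem.List.pyRange 0 (rd.length : Int) 1).filter
        (fun k => decide (j < k ∧ k ≤ pvKmax rd w i) && (pvR rd k == -(pvR rd i + pvR rd j)))).map
        (pvWin rd i)).foldl PySem.Set.add s := by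
  rw [PySem.List.foldl_ite_eq_foldl_filter, List.filter_filter, List.foldl_map]
  rfl

-- per i, A's j-loop contributions coincide with B's (outside B's j-range they vanish)
lemma pv_flat_eq (rd : List Int) (w i : Int) (hi : 0 ≤ i) (hiL : i < (rd.length : Int)) :
    (PySem.List.pyRange 0 (rd.length : Int) 1).flatMap (fun j => pvWs rd w i j) = pvGB rd w i := by
  have hkL : pvKmax rd w i ≤ (rd.length : Int) - 1 := min_le_left _ _
  have hmL : max (i + 1) (pvKmax rd w i) ≤ (rd.length : Int) := by omega
  have hsplit : PySem.List.pyRange 0 (rd.length : Int) 1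
      = PySem.List.pyRange 0 (i + 1) 1 ++ PySem.List.pyRange (i + 1) (max (i + 1) (pvKmax rd w i)) 1
        ++ PySem.List.pyRange (max (i + 1) (pvKmax rd w i)) (rd.length : Int) 1 := by
    rw [PySem.List.pyRange_one_append 0 (i + 1) (rd.length : Int) (by omega) (by omega),
        PySem.List.pyRange_one_append (i + 1) (max (i + 1) (pvKmax rd w i)) (rd.length : Int)
          (le_max_left _ _) hmL,
        List.append_assoc]
  have hmid : PySem.List.pyRange (i + 1) (max (i + 1) (pvKmax rd w i)) 1
      = PySem.List.pyRange (i + 1) (pvKmax rd w i) 1 := by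
    rcases le_total (pvKmax rd w i) (i + 1) with hc | hc
    · rw [max_eq_left hc, PySem.List.pyRange_one_eq_nil le_rfl, PySem.List.pyRange_one_eq_nil hc]
    · rw [max_eq_right hc]
  have hseg1 : ∀ j ∈ PySem.List.pyRange 0 (i + 1) 1, pvWs rd w i j = [] := by
    intro j hj
    rw [PySem.List.mem_pyRange_one] at hj
    unfold pvWs
    rw [List.filter_eq_nil_iff.mpr, List.map_nil]
    intro k _
    unfold pvCondA
    simp only [decide_eq_true_eq]
    rintro ⟨⟨hij, -⟩, -⟩
    omega
  have hseg3 : ∀ j ∈ PySem.List.pyRange (max (i + 1) (pvKmax rd w i)) (rd.length : Int) 1,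
      pvWs rd w i j = [] := by
    intro j hj
    rw [PySem.List.mem_pyRange_one] at hj
    unfold pvWs
    rw [List.filter_eq_nil_iff.mpr, List.map_nil]
    intro k hk
    rw [PySem.List.mem_pyRange_one] at hk
    unfold pvCondA
    simp only [decide_eq_true_eq]
    rintro ⟨⟨-, hjk⟩, -, hw⟩
    have := le_max_right (i + 1) (pvKmax rd w i)
    have h2 : k ≤ pvKmax rd w i := le_min (by omega) (by omega)
    omega
  have hcong : ∀ j ∈ PySem.List.pyRange (i + 1) (pvKmax rd w i) 1,
      pvWs rd w i j
      = ((PySem.List.pyRange 0 (rd.length : Int) 1).filter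
          (fun k => decide (j < k ∧ k ≤ pvKmax rd w i) && (pvR rd k == -(pvR rd i + pvR rd j)))).map
          (pvWin rd i) := by
    intro j hj
    rw [PySem.List.mem_pyRange_one] at hj
    unfold pvWs
    congr 1
    apply List.filter_congr
    intro k hk
    rw [PySem.List.mem_pyRange_one] at hk
    unfold pvCondA
    rw [Bool.beq_eq_decide_eq, ← Bool.decide_and]
    apply decide_eq_decide.mpr
    have h1 := min_le_left ((rd.length : Int) - 1) (i + w - 1)
    have h2 := min_le_right ((rd.length : Int) - 1) (i + w - 1)
    have h3 : (rd.length : Int) - 1 ≤ i + w - 1 ∨ i + w - 1 ≤ (rd.length : Int) - 1 := le_total _ _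
    unfold pvKmax at *
    constructor
    · rintro ⟨⟨hij, hjk⟩, hsum, hw⟩
      refine ⟨⟨hjk, ?_⟩, by omega⟩
      omega
    · rintro ⟨⟨hjk, hkm⟩, hneed⟩
      exact ⟨⟨by omega, hjk⟩, by omega, by omega⟩
  rw [hsplit, List.flatMap_append, List.flatMap_append]
  rw [List.flatMap_eq_nil_iff.mpr hseg1, List.flatMap_eq_nil_iff.mpr hseg3]
  rw [hmid, List.nil_append, List.append_nil]
  unfold pvGB
  exact List.flatMap_congr hcong

lemma pvA_eq (rd : List Int) (w : Int) (h : ¬((rd.length : Int) < 3)) :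
    findZeroSumTripletsInWindow rd w = pvNF rd w := by
  unfold findZeroSumTripletsInWindow
  simp only [if_neg h]
  simp only [pv_stepA]
  simp only [pv_foldl_flatMap]
  rfl

lemma pvB_eq (rd : List Int) (w : Int) (h : ¬((rd.length : Int) < 3)) :
    findZeroSumTripletsInWindow_alt rd w = pvNF rd w := by
  unfold findZeroSumTripletsInWindow_alt
  simp only [if_neg h]
  rw [show (PySem.Set.empty : PySem.Set (List Int)) = [] from rfl]
  rw [pv_foldl_diag _
    (fun s i => (PySem.List.pyRange (i + 1) (pvKmax rd w i) 1).foldl (fun s j =>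
      ((((PySem.List.enumerate rd 0).foldl (fun d p => d.modify p.2 [] (fun l => l ++ [p.1]))
          PySem.Dict.empty)).getD (-(PySem.List.pyGetD rd i 0 + PySem.List.pyGetD rd j 0)) []).foldl
        (fun s k => if j < k ∧ k ≤ pvKmax rd w i then
          PySem.Set.add s (PySem.List.slice rd (some i) (some (k + 1))) else s) s) s)
    (by
      intro s i
      rw [show min ((rd.length : Int) - 1) (i + w - 1) = pvKmax rd w i from rfl]
      apply pv_foldl_diag
      intro t j
      apply pv_foldl_diag
      intro u k
      by_cases hc : j < k ∧ k ≤ pvKmax rd w i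
      · simp only [if_pos hc]
        by_cases hm : PySem.List.slice rd (some i) (some (k + 1)) ∈ u
        · simp [PySem.Set.add, hm]
        · simp [PySem.Set.add, hm]
      · simp only [if_neg hc])]
  simp only [pv_positions, pv_stepB]
  simp only [pv_foldl_flatMap]
  unfold pvNF
  congr 1
  refine (List.flatMap_congr ?_).symm
  intro i hi
  rw [PySem.List.mem_pyRange_one] at hi
  exact pv_flat_eq rd w i hi.1 hi.2

-- ===== VERDICT (by name: the statement is the Claim_ definition above) =====

-- ===== VERDICT (by name: the statement is the Claim_ definition above) =====
theorem findZeroSumTripletsInWindow_spec : Claim_equal_findZeroSumTripletsInWindow := by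
  intro readings windowSize _
  unfold Spec_findZeroSumTripletsInWindow
  by_cases h : ((readings.length : Int) < 3)
  · unfold findZeroSumTripletsInWindow findZeroSumTripletsInWindow_alt
    simp only [if_pos h]
  · rw [pvA_eq readings windowSize h, pvB_eq readings windowSize h]
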